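-- pv_equiv track=rewrite | github.com/igrynok/learning-snippets | python/google_qa/rose_garden.py | min_days_salads
-- ===== SOURCE A (Python) =====
-- from typing import List
-- from bisect import insort_left
--
-- def min_days_salads(onions: List[int], k: int, n: int) -> int:
--     days = max(onions)
--     onion_dict = {}
--
--     for index, onion in enumerate(onions):
--         if onion not in onion_dict:
--             onion_dict[onion] = [index]
--         else:
--             onion_dict[onion].append(index)
--
--     count = 0
--     matured = []
--
--     for day in range(1, days + 1):
--
--         count += 1
--         if day in onion_dict:
--             for i in onion_dict[day]:
--                 insort_left(matured, i)
--
--         adjacent = 0 if len(matured) == 0 else 1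
--         for m in range(len(matured) - 1):
--             if matured[m + 1] - matured[m] == 1:
--                 adjacent += 1
--
--         salads = adjacent // k
--
--         if salads >= n:
--             return count
--
--     return -1
-- ===== SOURCE B (Python) =====
-- from typing import List
--
-- def min_days_salads(onions: List[int], k: int, n: int) -> int:
--     days = max(onions)
--     by_day = {}
--     for index, onion in enumerate(onions):
--         by_day.setdefault(onion, []).append(index)
--     bloomed = set()
--     pairs = 0
--     for day in range(1, days + 1):
--         for i in by_day.get(day, []):
--             if i - 1 in bloomed:
--                 pairs += 1
--             if i + 1 in bloomed:
--                 pairs += 1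
--             bloomed.add(i)
--         adjacent = pairs + (1 if bloomed else 0)
--         if adjacent // k >= n:
--             return day
--     return -1
-- ===== Notes on version B (the rewrite author's own statement) =====
-- stated objective: faster
-- what changed: Instead of maintaining a sorted list via insort and rescanning the whole list every day to recount adjacent pairs, B keeps a hash set of bloomed indices and an integer pair-counter updated in O(1) when each flower blooms, so the per-day inner scan disappears.
import Mathlib
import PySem

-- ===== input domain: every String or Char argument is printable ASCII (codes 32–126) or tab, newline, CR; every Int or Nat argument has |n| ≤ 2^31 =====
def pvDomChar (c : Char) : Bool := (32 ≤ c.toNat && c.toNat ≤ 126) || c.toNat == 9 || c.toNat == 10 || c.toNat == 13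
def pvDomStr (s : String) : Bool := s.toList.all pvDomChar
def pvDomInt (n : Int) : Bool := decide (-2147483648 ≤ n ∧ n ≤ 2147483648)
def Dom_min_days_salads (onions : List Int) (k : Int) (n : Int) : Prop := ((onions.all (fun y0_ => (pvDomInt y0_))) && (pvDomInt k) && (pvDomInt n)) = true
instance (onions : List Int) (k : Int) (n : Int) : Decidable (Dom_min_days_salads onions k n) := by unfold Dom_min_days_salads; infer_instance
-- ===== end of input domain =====

-- B replaces A's per-day insort + full rescan of the matured list by a bloomed-index set
-- and an incrementally maintained adjacent-pair counter (objective: faster).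

-- ===== PORT A =====
-- insort_left(matured, i)  =  matured.insert(bisect_left(matured, i), i)
def pvInsort (m : List Int) (i : Int) : List Int :=
  PySem.List.insert m ((PySem.List.bisectLeft m i : Nat) : Int) i

-- adjacent = 0 if len(matured)==0 else 1; for m in range(len(matured)-1): if matured[m+1]-matured[m]==1: adjacent += 1
def pvAdjA (matured : List Int) : Int :=
  (PySem.List.pyRange 0 (PySem.List.len matured - 1) 1).foldl
    (fun adj m =>
      if PySem.List.pyGetD matured (m + 1) 0 - PySem.List.pyGetD matured m 0 == 1 then adj + 1 else adj)
    (if matured.length == 0 then 0 else 1)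

-- the day loop of A: 'for day in range(1, days + 1)' with early return, as fuel recursion
-- on the number of remaining days (range is consumed lazily, day = count + 1 each turn)
def pvLoopA (dict : PySem.Dict Int (List Int)) (k n : Int) : Nat → Int → List Int → Int
  | 0, _count, _matured => -1
  | fuel + 1, count, matured =>
    let count' := count + 1
    let matured' := if dict.contains count' then (dict.getD count' []).foldl pvInsort matured else matured
    let salads := PySem.Int.floordiv (pvAdjA matured') k
    if salads ≥ n then count' else pvLoopA dict k n fuel count' matured'

def min_days_salads (onions : List Int) (k : Int) (n : Int) : Int :=
  match PySem.List.max? onions (fun y => y) with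
  | none => 0  -- unreachable: max([]) raises ValueError, excluded by Pre_
  | some days =>
    let onion_dict := (PySem.List.enumerate onions 0).foldl
      (fun d p => if !d.contains p.2 then d.insert p.2 [p.1] else d.modify p.2 [] (fun l => l ++ [p.1]))
      PySem.Dict.empty
    pvLoopA onion_dict k n days.toNat 0 []

-- ===== PORT B =====
-- processing one blooming flower i: bump pairs by its already-bloomed neighbours, add i to the set
def pvStepB (s : PySem.Set Int × Int) (i : Int) : PySem.Set Int × Int :=
  let p1 := if s.1.contains (i - 1) then s.2 + 1 else s.2
  let p2 := if s.1.contains (i + 1) then p1 + 1 else p1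
  (PySem.Set.add s.1 i, p2)

-- B's day loop, same lazy fuel recursion over 'range(1, days + 1)', carrying the day
def pvLoopB (dict : PySem.Dict Int (List Int)) (k n : Int) : Nat → Int → PySem.Set Int → Int → Int
  | 0, _day, _bloomed, _pairs => -1
  | fuel + 1, day, bloomed, pairs =>
    let st := (dict.getD day []).foldl pvStepB (bloomed, pairs)
    let adjacent := st.2 + (if st.1.isEmpty then 0 else 1)
    if PySem.Int.floordiv adjacent k ≥ n then day else pvLoopB dict k n fuel (day + 1) st.1 st.2

def min_days_salads_alt (onions : List Int) (k : Int) (n : Int) : Int :=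
  match PySem.List.max? onions (fun y => y) with
  | none => 0  -- unreachable: max([]) raises ValueError, excluded by Pre_
  | some days =>
    let by_day := (PySem.List.enumerate onions 0).foldl
      (fun d p => d.modify p.2 [] (fun l => l ++ [p.1]))  -- by_day.setdefault(onion, []).append(index)
      PySem.Dict.empty
    pvLoopB by_day k n days.toNat 1 PySem.Set.empty 0

-- ===== PRECONDITION & SPEC =====
-- Pre_ excludes exactly the inputs where Python A raises: max([]) is a ValueError, and
-- when some onion is ≥ 1 the day loop runs, so k = 0 is a ZeroDivisionError there.
def Pre_min_days_salads (onions : List Int) (k : Int) (n : Int) : Prop :=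
  onions ≠ [] ∧ (k ≠ 0 ∨ (onions.all (fun x => x ≤ 0)) = true)
instance (onions : List Int) (k : Int) (n : Int) : Decidable (Pre_min_days_salads onions k n) := by
  unfold Pre_min_days_salads; infer_instance

def pvWitness_min_days_salads : List Int × Int × Int := ([1, 2], 1, 1)

def Spec_min_days_salads (onions : List Int) (k : Int) (n : Int) (out : Int) : Prop := out = min_days_salads_alt onions k n
instance (onions : List Int) (k : Int) (n : Int) (out : Int) : Decidable (Spec_min_days_salads onions k n out) := by unfold Spec_min_days_salads; infer_instance

-- ===== CLAIM (what is proved, stated in full; the proofs are below) =====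
def Claim_equal_min_days_salads : Prop := ∀ (onions : List Int) (k : Int) (n : Int), Dom_min_days_salads onions k n → Pre_min_days_salads onions k n → Spec_min_days_salads onions k n (min_days_salads onions k n)

-- ===== LEMMAS AND PROOFS =====

-- number of adjacent index pairs inside m (as a set)
def pvPairs (m : List Int) : Int := (m.countP (fun j => decide ((j + 1) ∈ m)) : Int)

theorem pv_modify_not_contains {ν : Type} (d : PySem.Dict Int ν) (key : Int) (dflt : ν) (f : ν → ν)
    (h : d.contains key = false) : d.modify key dflt f = d.insert key (f dflt) := by
  rw [PySem.Dict.modify, PySem.Dict.getD_of_not_contains (h := h)]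

theorem pv_foldl_funext {α β : Type} (l : List α) (init : β) (f g : β → α → β)
    (h : ∀ b a, f b a = g b a) : l.foldl f init = l.foldl g init := by
  have : f = g := by funext b a; exact h b a
  rw [this]

theorem pv_dict_eq (onions : List Int) :
    (PySem.List.enumerate onions 0).foldl
      (fun d p => if !d.contains p.2 then d.insert p.2 [p.1] else d.modify p.2 [] (fun l => l ++ [p.1]))
      PySem.Dict.empty
    = (PySem.List.enumerate onions 0).foldl
      (fun d p => d.modify p.2 [] (fun l => l ++ [p.1])) PySem.Dict.empty := by
  apply pv_foldl_funext
  intro d p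
  by_cases h : d.contains p.2
  · simp [h]
  · simp only [Bool.not_eq_true] at h
    rw [pv_modify_not_contains _ _ _ _ h]
    simp [h]

theorem pv_group (onions : List Int) (v : Int) :
    ((PySem.List.enumerate onions 0).foldl
      (fun d p => d.modify p.2 [] (fun l => l ++ [p.1])) PySem.Dict.empty).getD v []
    = ((PySem.List.enumerate onions 0).filter (fun p => p.2 == v)).map (fun p => p.1) := by
  have h := PySem.Dict.getD_foldl_modify_append
      ((PySem.List.enumerate onions 0).map (fun p => (p.2, p.1))) PySem.Dict.empty v
  rw [List.foldl_map] at h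
  simp only [h]
  rw [List.filter_map]
  simp [List.map_map, Function.comp_def]

theorem pv_group_sorted (onions : List Int) (v : Int) :
    (((PySem.List.enumerate onions 0).filter (fun p => p.2 == v)).map (fun p => p.1)).Pairwise (· < ·) := by
  apply List.Pairwise.map
  · exact fun a b h => h
  · exact (PySem.List.pairwise_lt_enumerate onions 0).filter _

theorem pv_group_disjoint (onions : List Int) (v w i : Int) (hvw : v ≠ w)
    (hv : i ∈ ((PySem.List.enumerate onions 0).filter (fun p => p.2 == v)).map (fun p => p.1)) :
    i ∉ ((PySem.List.enumerate onions 0).filter (fun p => p.2 == w)).map (fun p => p.1) := by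
  intro hw
  simp only [List.mem_map, List.mem_filter] at hv hw
  obtain ⟨p, ⟨hpmem, hpv⟩, hpi⟩ := hv
  obtain ⟨q, ⟨hqmem, hqw⟩, hqi⟩ := hw
  rw [PySem.List.mem_enumerate_iff] at hpmem hqmem
  obtain ⟨a, ha, rfl⟩ := hpmem
  obtain ⟨b, hb, rfl⟩ := hqmem
  simp only at hpi hqi hpv hqw
  have hab : a = b := by omega
  subst hab
  rw [beq_iff_eq] at hpv hqw
  exact hvw (hpv ▸ hqw ▸ rfl)

theorem pv_insort_fresh (m : List Int) (i : Int) (hs : m.Pairwise (· < ·)) (hi : i ∉ m) :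
    (pvInsort m i).Pairwise (· < ·) ∧ (∀ x, x ∈ pvInsort m i ↔ x = i ∨ x ∈ m) := by
  obtain ⟨hle, hlt, hge⟩ := PySem.List.bisectLeft_spec m i (hs.imp le_of_lt)
  set p := PySem.List.bisectLeft m i with hp
  have hins : pvInsort m i = m.take p ++ i :: m.drop p := by
    unfold pvInsort
    exact PySem.List.insert_natCast m p i hle
  have htd : m.take p ++ m.drop p = m := List.take_append_drop p m
  have htlt : ∀ x ∈ m.take p, x < i := by
    intro x hx
    rw [List.mem_take_iff_getElem] at hx
    obtain ⟨j, hj, hjx⟩ := hx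
    have hjp : j < p := (lt_min_iff.mp hj).1
    have hjm : j < m.length := (lt_min_iff.mp hj).2
    exact hjx ▸ hlt j hjm hjp
  have hdgt : ∀ x ∈ m.drop p, i < x := by
    intro x hx
    rw [List.mem_drop_iff_getElem] at hx
    obtain ⟨j, hj, hjx⟩ := hx
    have hj' : p + j < m.length := by omega
    have := hge (p + j) hj' (Nat.le_add_right p j)
    rw [hjx] at this
    rcases lt_or_eq_of_le this with h | h
    · exact h
    · have hxm : x ∈ m := hjx ▸ List.getElem_mem hj'
      exact absurd (h ▸ hxm) hi
  constructor
  · rw [hins, List.pairwise_append]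
    have hm' : (m.take p ++ m.drop p).Pairwise (· < ·) := by rw [htd]; exact hs
    rw [List.pairwise_append] at hm'
    obtain ⟨ht, hd, hcross⟩ := hm'
    refine ⟨ht, List.pairwise_cons.mpr ⟨hdgt, hd⟩, ?_⟩
    intro x hx y hy
    rcases List.mem_cons.mp hy with rfl | hy'
    · exact htlt x hx
    · exact hcross x hx y hy'
  · intro x
    rw [hins]
    constructor
    · intro hx
      rcases List.mem_append.mp hx with h | h
      · exact Or.inr (htd ▸ List.mem_append.mpr (Or.inl h))
      · rcases List.mem_cons.mp h with rfl | h'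
        · exact Or.inl rfl
        · exact Or.inr (htd ▸ List.mem_append.mpr (Or.inr h'))
    · intro hx
      rcases hx with rfl | hx'
      · exact List.mem_append.mpr (Or.inr (List.mem_cons_self))
      · have hx'' : x ∈ m.take p ++ m.drop p := by rw [htd]; exact hx'
        rcases List.mem_append.mp hx'' with h | h
        · exact List.mem_append.mpr (Or.inl h)
        · exact List.mem_append.mpr (Or.inr (List.mem_cons_of_mem _ h))

-- countP on a nodup list as a Finset filter card
theorem pv_countP_toFinset (m : List Int) (hnd : m.Nodup) (p : Int → Bool) :
    m.countP p = (m.toFinset.filter (fun x => p x)).card := by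
  rw [List.countP_eq_length_filter, ← List.toFinset_filter]
  exact (List.toFinset_card_of_nodup (hnd.filter p)).symm

theorem pv_pairs_insert (m m₁ : List Int) (i : Int) (hs : m.Pairwise (· < ·)) (hi : i ∉ m)
    (hs1 : m₁.Pairwise (· < ·)) (hm1 : ∀ x, x ∈ m₁ ↔ x = i ∨ x ∈ m) :
    pvPairs m₁ = pvPairs m + (if (i - 1) ∈ m then 1 else 0) + (if (i + 1) ∈ m then 1 else 0) := by
  have hnd : m.Nodup := hs.nodup
  have hnd1 : m₁.Nodup := hs1.nodup
  set s : Finset Int := m.toFinset with hsdef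
  have hs1f : m₁.toFinset = insert i s := by
    ext x
    simp [hsdef, hm1]
  unfold pvPairs
  rw [pv_countP_toFinset m hnd, pv_countP_toFinset m₁ hnd1]
  -- rewrite the predicates through toFinset membership
  have hpred1 : ∀ x, (decide ((x + 1) ∈ m₁)) = decide (x + 1 = i ∨ (x + 1) ∈ s) := by
    intro x; simp [hsdef, hm1]
  have hpred : ∀ x, (decide ((x + 1) ∈ m)) = decide ((x + 1) ∈ s) := by
    intro x; simp [hsdef]
  have h1 : m₁.toFinset.filter (fun x => decide ((x + 1) ∈ m₁))
      = (insert i s).filter (fun x => x + 1 = i ∨ (x + 1) ∈ s) := by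
    rw [hs1f]
    apply Finset.filter_congr
    intro x _
    simp [hsdef, hm1]
  have h0 : m.toFinset.filter (fun x => decide ((x + 1) ∈ m)) = s.filter (fun x => (x + 1) ∈ s) := by
    apply Finset.filter_congr
    intro x _
    simp [hsdef]
  rw [h1, h0]
  have hiS : i ∉ s := by simp [hsdef, hi]
  have hfi : Finset.filter (fun x => x + 1 = i ∨ (x + 1) ∈ s) (insert i s)
      = if (i + 1) ∈ s then insert i (s.filter (fun x => x + 1 = i ∨ (x + 1) ∈ s))
        else s.filter (fun x => x + 1 = i ∨ (x + 1) ∈ s) := by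
    rw [Finset.filter_insert]
    have : (i + 1 = i ∨ (i + 1) ∈ s) ↔ (i + 1) ∈ s := by
      constructor
      · rintro (h | h)
        · exact absurd h (by omega)
        · exact h
      · exact Or.inr
    split_ifs with h1 h2 h2 <;> first | rfl | (exfalso; rw [this] at h1; exact absurd h1 h2) | (exfalso; rw [this] at h1; exact h1 h2)
  have heq1 : s.filter (fun x => x + 1 = i) = s.filter (fun x => x = i - 1) := by
    apply Finset.filter_congr
    intro x _
    constructor
    · intro h; omega
    · intro h; omega
  have hsplit : Finset.filter (fun x => x + 1 = i ∨ (x + 1) ∈ s) s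
      = (s.filter (fun x => x + 1 = i)) ∪ (s.filter (fun x => (x + 1) ∈ s)) := by
    apply Finset.filter_or
  have hdisj : Disjoint (s.filter (fun x => x = i - 1)) (s.filter (fun x => (x + 1) ∈ s)) := by
    rw [Finset.disjoint_left]
    intro x hx hx'
    simp only [Finset.mem_filter] at hx hx'
    have : i ∈ s := by
      have := hx'.2
      rw [hx.2] at this
      simpa using this
    exact hiS this
  have hcards : (Finset.filter (fun x => x + 1 = i ∨ (x + 1) ∈ s) s).card
      = (s.filter (fun x => (x + 1) ∈ s)).card + (if (i - 1) ∈ s then 1 else 0) := by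
    rw [hsplit, heq1, Finset.card_union_of_disjoint hdisj, Finset.filter_eq']
    by_cases hA : (i - 1) ∈ s
    · simp [hA, Nat.add_comm]
    · simp [hA]
  have hsub : Finset.filter (fun x => x + 1 = i ∨ (x + 1) ∈ s) s ⊆ s := Finset.filter_subset _ _
  have hm1mem : ((i - 1) ∈ m) = ((i - 1) ∈ s) := by simp [hsdef]
  have hm2mem : ((i + 1) ∈ m) = ((i + 1) ∈ s) := by simp [hsdef]
  rw [hfi]
  by_cases hB : (i + 1) ∈ s
  · rw [if_pos hB, Finset.card_insert_of_notMem (fun hmem => hiS (hsub hmem)), hcards]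
    simp only [hm1mem, hm2mem, if_pos hB]
    by_cases hA : (i - 1) ∈ s <;> simp [hA]
  · rw [if_neg hB, hcards]
    simp only [hm1mem, hm2mem, if_neg hB]
    by_cases hA : (i - 1) ∈ s <;> simp [hA]

-- step 3: gap count of a strictly sorted list = pair count
theorem pv_zip_pairs (m : List Int) (hs : m.Pairwise (· < ·)) :
    (m.zip m.tail).countP (fun q => q.2 - q.1 == 1) = m.countP (fun j => decide ((j + 1) ∈ m)) := by
  induction m with
  | nil => simp
  | cons a t ih =>
    match t, hs with
    | [], _ => simp
    | b :: t', hs =>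
      have hab : a < b := (List.pairwise_cons.mp hs).1 b List.mem_cons_self
      have hlt : ∀ j ∈ b :: t', a < j := (List.pairwise_cons.mp hs).1
      have hs' : (b :: t').Pairwise (· < ·) := (List.pairwise_cons.mp hs).2
      have h1 : (a + 1 ∈ a :: b :: t') ↔ b - a = 1 := by
        constructor
        · intro h
          rcases List.mem_cons.mp h with h | h
          · omega
          · rcases List.mem_cons.mp h with h | h
            · omega
            · have := (List.pairwise_cons.mp hs').1 _ h
              omega
        · intro h
          have : a + 1 = b := by omega
          exact this ▸ List.mem_cons_of_mem _ List.mem_cons_self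
      have h2 : ∀ j ∈ b :: t', (decide ((j + 1) ∈ a :: b :: t')) = decide ((j + 1) ∈ b :: t') := by
        intro j hj
        have := hlt j hj
        simp only [List.mem_cons, decide_eq_decide]
        constructor
        · rintro (h | h)
          · omega
          · exact h
        · intro h; exact Or.inr h
      have hcongr : (b :: t').countP (fun j => decide ((j + 1) ∈ a :: b :: t'))
          = (b :: t').countP (fun j => decide ((j + 1) ∈ b :: t')) :=
        List.countP_congr (fun x hx => by rw [h2 x hx])
      have hqa : (decide ((a + 1) ∈ a :: b :: t')) = (b - a == 1) := by
        by_cases h : a + 1 ∈ a :: b :: t'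
        · simp [h, h1.mp h]
        · have : ¬ (b - a = 1) := fun hh => h (h1.mpr hh)
          simp [h, this]
      calc ((a :: b :: t').zip ((a :: b :: t').tail)).countP (fun q => q.2 - q.1 == 1)
          = ((b :: t').zip t').countP (fun q => q.2 - q.1 == 1)
            + (if ((b : Int) - a == 1) then 1 else 0) := by
            simp [List.countP_cons]
        _ = (b :: t').countP (fun j => decide ((j + 1) ∈ b :: t'))
            + (if (decide ((a + 1) ∈ a :: b :: t')) then 1 else 0) := by
            rw [hqa]
            have ih' := ih hs'
            simp only [List.tail_cons] at ih'
            rw [ih']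
        _ = (a :: b :: t').countP (fun j => decide ((j + 1) ∈ a :: b :: t')) := by
            rw [← hcongr]
            simp only [List.countP_cons]

theorem pv_zip_eq_range_map (m : List Int) :
    m.zip m.tail = (List.range (m.length - 1)).map (fun kk => (m.getD kk 0, m.getD (kk + 1) 0)) := by
  apply List.ext_getElem
  · simp [List.length_zip]
  · intro k h1 h2
    simp only [List.getElem_zip, List.getElem_map, List.getElem_range]
    have hk : k < m.length - 1 := by simpa using h2
    have hk1 : k < m.length := by omega
    have hk2 : k + 1 < m.length := by omega
    rw [List.getD_eq_getElem m 0 hk1, List.getD_eq_getElem m 0 hk2, List.getElem_tail]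

theorem pv_adjA_eq (m : List Int) (hs : m.Pairwise (· < ·)) :
    pvAdjA m = (if m = [] then 0 else 1) + pvPairs m := by
  unfold pvAdjA
  rw [PySem.List.foldl_count_if]
  have hlen : ((PySem.List.len m - 1) - 0).toNat = m.length - 1 := by
    simp [PySem.List.len_eq]
  have hrange : PySem.List.pyRange 0 (PySem.List.len m - 1) 1
      = (List.range (m.length - 1)).map (fun kk : Nat => (kk : Int)) := by
    rw [PySem.List.pyRange_one, hlen]
    simp
  rw [hrange, List.countP_map]
  have hpred : ∀ kk, kk ∈ List.range (m.length - 1) →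
      ((fun mm : Int => PySem.List.pyGetD m (mm + 1) 0 - PySem.List.pyGetD m mm 0 == 1) ∘ (fun kk : Nat => (kk : Int))) kk
      = ((fun q : Int × Int => q.2 - q.1 == 1) ∘ (fun kk : Nat => (m.getD kk 0, m.getD (kk + 1) 0))) kk := by
    intro kk hk
    simp only [Function.comp_apply]
    have h1 : PySem.List.pyGetD m ((kk : Int) + 1) 0 = m.getD (kk + 1) 0 := by
      rw [show ((kk : Int) + 1) = ((kk + 1 : Nat) : Int) by push_cast; ring]
      exact PySem.List.pyGetD_natCast m (kk + 1) 0
    have h2 : PySem.List.pyGetD m (kk : Int) 0 = m.getD kk 0 := PySem.List.pyGetD_natCast m kk 0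
    rw [h1, h2]
  rw [List.countP_congr (fun x hx => by rw [hpred x hx]), ← List.countP_map, ← pv_zip_eq_range_map,
    pv_zip_pairs m hs]
  unfold pvPairs
  cases m <;> simp

-- simulation of the inner (per-day) folds
theorem pv_fold_sim (g : List Int) (matured : List Int) (bloomed : PySem.Set Int) (pairs : Int)
    (hs : matured.Pairwise (· < ·)) (hg : g.Pairwise (· < ·)) (hfresh : ∀ i ∈ g, i ∉ matured)
    (hmem : ∀ x, x ∈ bloomed ↔ x ∈ matured) (hp : pairs = pvPairs matured) :
    (g.foldl pvInsort matured).Pairwise (· < ·) ∧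
    (∀ x, x ∈ (g.foldl pvStepB (bloomed, pairs)).1 ↔ x ∈ g.foldl pvInsort matured) ∧
    (∀ x, x ∈ g.foldl pvInsort matured ↔ x ∈ matured ∨ x ∈ g) ∧
    (g.foldl pvStepB (bloomed, pairs)).2 = pvPairs (g.foldl pvInsort matured) := by
  induction g generalizing matured bloomed pairs with
  | nil =>
    refine ⟨hs, fun x => (hmem x), fun x => by simp, hp.symm ▸ rfl⟩
  | cons i g' ih =>
    have hig' : ∀ j ∈ g', i < j := (List.pairwise_cons.mp hg).1
    have hg' : g'.Pairwise (· < ·) := (List.pairwise_cons.mp hg).2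
    have hifresh : i ∉ matured := hfresh i List.mem_cons_self
    obtain ⟨hs1, hmem1⟩ := pv_insort_fresh matured i hs hifresh
    have hcont : ∀ y : Int, bloomed.contains y = decide (y ∈ matured) := by
      intro y
      by_cases hy : y ∈ matured
      · simp only [hy, decide_true]
        exact (PySem.Set.contains_iff bloomed y).mpr ((hmem y).mpr hy)
      · simp only [hy, decide_false]
        by_cases hc : bloomed.contains y = true
        · exact absurd ((hmem y).mp ((PySem.Set.contains_iff bloomed y).mp hc)) hy
        · simpa using hc
    have hstep : pvStepB (bloomed, pairs) i
        = (PySem.Set.add bloomed i,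
           pvPairs (pvInsort matured i)) := by
      unfold pvStepB
      simp only [hcont]
      rw [pv_pairs_insert matured (pvInsort matured i) i hs hifresh hs1 hmem1, hp]
      by_cases h1 : (i - 1) ∈ matured <;> by_cases h2 : (i + 1) ∈ matured <;>
        simp [h1, h2]
    have hmemadd : ∀ x, x ∈ PySem.Set.add bloomed i ↔ x ∈ pvInsort matured i := by
      intro x
      rw [PySem.Set.mem_add, hmem1 x, hmem x]
      tauto
    have hfresh' : ∀ j ∈ g', j ∉ pvInsort matured i := by
      intro j hj hjm
      rcases (hmem1 j).mp hjm with rfl | hjm'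
      · exact absurd (hig' j hj) (lt_irrefl _)
      · exact hfresh j (List.mem_cons_of_mem _ hj) hjm'
    have := ih (pvInsort matured i) (PySem.Set.add bloomed i) (pvPairs (pvInsort matured i))
      hs1 hg' hfresh' hmemadd rfl
    obtain ⟨c1, c2, c3, c4⟩ := this
    refine ⟨?_, ?_, ?_, ?_⟩
    · simpa [List.foldl_cons] using c1
    · intro x
      simpa [List.foldl_cons, hstep] using c2 x
    · intro x
      have := c3 x
      simp only [List.foldl_cons] at this ⊢
      rw [this, hmem1 x]
      simp only [List.mem_cons]
      tauto
    · simp only [List.foldl_cons, hstep]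
      exact c4

-- simulation of the day loops
theorem pv_loop_sim (dict : PySem.Dict Int (List Int)) (k n : Int) (fuel : Nat) :
    ∀ (count : Int) (matured : List Int) (bloomed : PySem.Set Int) (pairs : Int),
    (∀ d1 d2 i, d1 ≠ d2 → i ∈ dict.getD d1 [] → i ∉ dict.getD d2 []) →
    (∀ d, (dict.getD d []).Pairwise (· < ·)) →
    matured.Pairwise (· < ·) →
    (∀ x, x ∈ bloomed ↔ x ∈ matured) →
    pairs = pvPairs matured →
    (∀ d i, count < d → i ∈ dict.getD d [] → i ∉ matured) →
    pvLoopA dict k n fuel count matured = pvLoopB dict k n fuel (count + 1) bloomed pairs := by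
  induction fuel with
  | zero =>
    intro count matured bloomed pairs _ _ _ _ _ _
    rfl
  | succ fuel ih =>
    intro count matured bloomed pairs hdisj hsort hs hmem hp hfresh
    set day := count + 1 with hday
    set g := dict.getD day [] with hgdef
    have hgs : g.Pairwise (· < ·) := hsort day
    have hgfresh : ∀ i ∈ g, i ∉ matured := fun i hi => hfresh day i (by omega) hi
    obtain ⟨hs1, hmemeq, hunion, hpairs⟩ :=
      pv_fold_sim g matured bloomed pairs hs hgs hgfresh hmem hp
    have hmat : (if dict.contains day then (dict.getD day []).foldl pvInsort matured else matured)
        = g.foldl pvInsort matured := by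
      by_cases h : dict.contains day
      · rw [if_pos h]
      · have h' : dict.contains day = false := by simpa using h
        rw [if_neg (by simp [h'])]
        rw [show g = ([] : List Int) from by rw [hgdef]; exact PySem.Dict.getD_of_not_contains _ _ h']
        rfl
    set matured' := g.foldl pvInsort matured with hm'
    set st := g.foldl pvStepB (bloomed, pairs) with hst
    have hiff : st.1 = [] ↔ matured' = [] := by
      simp only [List.eq_nil_iff_forall_not_mem]
      constructor
      · intro h x hx
        exact h x ((hmemeq x).mpr hx)
      · intro h x hx
        exact h x ((hmemeq x).mp hx)
    have hempty : st.1.isEmpty = decide (matured' = []) := by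
      by_cases h : matured' = [] <;> simp [List.isEmpty_iff, hiff, h]
    have hadj : pvAdjA matured' = st.2 + (if st.1.isEmpty then 0 else 1) := by
      rw [pv_adjA_eq matured' hs1, hpairs, hempty]
      by_cases h : matured' = [] <;> simp [h] <;> ring
    show (let count' := day
          let m' := if dict.contains day then (dict.getD day []).foldl pvInsort matured else matured
          let salads := PySem.Int.floordiv (pvAdjA m') k
          if salads ≥ n then count' else pvLoopA dict k n fuel count' m')
        = (let stb := (dict.getD day []).foldl pvStepB (bloomed, pairs)
           let adjacent := stb.2 + (if stb.1.isEmpty then 0 else 1)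
           if PySem.Int.floordiv adjacent k ≥ n then day else pvLoopB dict k n fuel (day + 1) stb.1 stb.2)
    simp only [hmat, ← hgdef, ← hm', ← hst, hadj]
    by_cases hcond : PySem.Int.floordiv (st.2 + (if st.1.isEmpty then 0 else 1)) k ≥ n
    · simp only [if_pos hcond]
    · simp only [if_neg hcond]
      have hfresh' : ∀ d i, day < d → i ∈ dict.getD d [] → i ∉ matured' := by
        intro d i hd hi him
        rcases (hunion i).mp him with h | h
        · exact hfresh d i (by omega) hi h
        · exact hdisj d day i (by omega) hi h
      exact ih day matured' st.1 st.2 hdisj hsort hs1 hmemeq hpairs hfresh'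

-- ===== VERDICT (by name: the statement is the Claim_ definition above) =====
theorem min_days_salads_spec : Claim_equal_min_days_salads := by
  intro onions k n _ _
  unfold Spec_min_days_salads min_days_salads min_days_salads_alt
  cases hmax : PySem.List.max? onions (fun y => y) with
  | none => rfl
  | some days =>
    simp only
    rw [pv_dict_eq]
    set dict := (PySem.List.enumerate onions 0).foldl
      (fun d p => d.modify p.2 [] (fun l => l ++ [p.1])) PySem.Dict.empty with hd
    have hgrp : ∀ v, dict.getD v []
        = ((PySem.List.enumerate onions 0).filter (fun p => p.2 == v)).map (fun p => p.1) := by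
      intro v
      rw [hd]
      exact pv_group onions v
    have h01 : (0 : Int) + 1 = 1 := by norm_num
    rw [← h01]
    apply pv_loop_sim dict k n days.toNat 0 [] PySem.Set.empty 0
    · intro d1 d2 i hne hi
      rw [hgrp d1] at hi
      rw [hgrp d2]
      exact pv_group_disjoint onions d1 d2 i hne hi
    · intro d
      rw [hgrp d]
      exact pv_group_sorted onions d
    · exact List.Pairwise.nil
    · intro x
      simp [PySem.Set.empty]
    · simp [pvPairs]
    · intro d i _ _
      simp
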